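-- pv_equiv track=rewrite | github.com/lawrencewang94/jax_eigs | plotting.py | bc_check_neighbours
-- ===== SOURCE A (Python) =====
-- def bc_check_neighbours(this_inds, n_points=100):
--     out_inds = []
--     n_inds = len(this_inds)
--     max_inds = n_points ** 2
--
--     def bin_search(arr, low, high, x):
--         # Check base case
--         if high >= low:
--             mid = (high + low) // 2
--             # If element is present at the middle itself
--             if arr[mid] == x:
--                 return mid
--             # If element is smaller than mid, then it can only
--             # be present in left subarray
--             elif arr[mid] > x:
--                 return bin_search(arr, low, mid - 1, x)
--             # Else the element can only be present in right subarray
--             else: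
--                 return bin_search(arr, mid + 1, high, x)
--         else:
--             # Element is not present in the array
--             return -1
--
--     for ind in this_inds:
--         # check up
--         if ind >= n_points:
--             if bin_search(this_inds, 0, n_inds - 1, ind - n_points) == -1:
--                 out_inds.append(ind)
--                 continue
--         # check bottom
--         if ind < max_inds - n_points:
--             if bin_search(this_inds, 0, n_inds - 1, ind + n_points) == -1:
--                 out_inds.append(ind)
--                 continue
--
--         # check left
--         if ind % n_points > 0:
--             if bin_search(this_inds, 0, n_inds - 1, ind - 1) == -1:
--                 out_inds.append(ind)
--                 continue
--
--         # check right
--         if (ind + 1) % n_points != 0: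
--             if bin_search(this_inds, 0, n_inds - 1, ind + 1) == -1:
--                 out_inds.append(ind)
--                 continue
--     return out_inds
-- ===== SOURCE B (Python) =====
-- def bc_check_neighbours(this_inds, n_points=100):
--     n = len(this_inds)
--     max_inds = n_points ** 2
--
--     def present(x):
--         low, high = 0, n - 1
--         while high >= low:
--             mid = (high + low) // 2
--             v = this_inds[mid]
--             if v == x:
--                 return True
--             if v > x:
--                 high = mid - 1
--             else:
--                 low = mid + 1
--         return False
--
--     def lacks_neighbour(ind):
--         checks = []
--         if ind >= n_points:
--             checks.append(ind - n_points)
--         if ind < max_inds - n_points: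
--             checks.append(ind + n_points)
--         if ind % n_points > 0:
--             checks.append(ind - 1)
--         if (ind + 1) % n_points != 0:
--             checks.append(ind + 1)
--         return any(not present(x) for x in checks)
--
--     return [ind for ind in this_inds if lacks_neighbour(ind)]
-- ===== Notes on version B (the rewrite author's own statement) =====
-- stated objective: alternative
-- what changed: The recursive bin_search returning an index is replaced by an iterative low/high-pointer search returning a Boolean, and the per-index continue-chain of nested if/append/continue is replaced by building the list of applicable neighbour candidates and filtering the input with any(neighbour absent).
import Mathlib
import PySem

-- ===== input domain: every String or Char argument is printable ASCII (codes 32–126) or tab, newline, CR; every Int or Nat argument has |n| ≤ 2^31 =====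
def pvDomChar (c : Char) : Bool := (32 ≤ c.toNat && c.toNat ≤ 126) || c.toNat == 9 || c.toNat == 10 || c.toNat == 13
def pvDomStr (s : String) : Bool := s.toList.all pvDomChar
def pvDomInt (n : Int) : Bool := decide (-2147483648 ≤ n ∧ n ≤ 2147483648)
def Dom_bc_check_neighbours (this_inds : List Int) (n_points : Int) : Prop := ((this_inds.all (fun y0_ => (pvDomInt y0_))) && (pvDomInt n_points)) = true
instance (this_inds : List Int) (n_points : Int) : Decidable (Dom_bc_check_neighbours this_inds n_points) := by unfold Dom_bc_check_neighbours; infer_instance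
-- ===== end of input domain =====

-- B replaces A's recursive bin_search/continue-chain with an iterative-style Boolean search plus a
-- per-index candidate-neighbour list tested with any(); same values returned (objective: alternative).

-- ===== PORT A =====
-- A's recursive bin_search; arr[mid] ported as pyGet? with getD 0 (the index is always in range on
-- every call A makes, so the IndexError case is unreachable). `fuel` is only a structural
-- totality guard: the interval shrinks at every call, so arr.length + 1 is always enough.
def pvBinSearch (arr : List Int) (fuel : Nat) (low high x : Int) : Int :=
  match fuel with
  | 0 => -1
  | fuel + 1 =>
    if high ≥ low then
      let mid := PySem.Int.floordiv (high + low) 2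
      let v := (PySem.List.pyGet? arr mid).getD 0
      if v = x then mid
      else if v > x then pvBinSearch arr fuel low (mid - 1) x
      else pvBinSearch arr fuel (mid + 1) high x
    else -1

def bc_check_neighbours (this_inds : List Int) (n_points : Int) : List Int :=
  let n_inds : Int := this_inds.length
  let max_inds := n_points ^ 2
  this_inds.foldl (fun out_inds ind =>
    -- the `continue` chain: each found neighbour falls through to the next check
    let after_left :=
      if PySem.Int.mod (ind + 1) n_points ≠ 0 then
        if pvBinSearch this_inds (this_inds.length + 1) 0 (n_inds - 1) (ind + 1) = -1 then out_inds ++ [ind]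
        else out_inds
      else out_inds
    let after_bottom :=
      if PySem.Int.mod ind n_points > 0 then
        if pvBinSearch this_inds (this_inds.length + 1) 0 (n_inds - 1) (ind - 1) = -1 then out_inds ++ [ind]
        else after_left
      else after_left
    let after_up :=
      if ind < max_inds - n_points then
        if pvBinSearch this_inds (this_inds.length + 1) 0 (n_inds - 1) (ind + n_points) = -1 then out_inds ++ [ind]
        else after_bottom
      else after_bottom
    if ind ≥ n_points then
      if pvBinSearch this_inds (this_inds.length + 1) 0 (n_inds - 1) (ind - n_points) = -1 then out_inds ++ [ind]
      else after_up
    else after_up) []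

-- ===== PORT B =====
-- B's iterative `present` loop (low/high pointers), as tail recursion on the same state;
-- `fuel` is only a structural totality guard, as in pvBinSearch.
def pvPresentLoop (arr : List Int) (fuel : Nat) (x low high : Int) : Bool :=
  match fuel with
  | 0 => false
  | fuel + 1 =>
    if high ≥ low then
      let mid := PySem.Int.floordiv (high + low) 2
      let v := (PySem.List.pyGet? arr mid).getD 0
      if v = x then true
      else if v > x then pvPresentLoop arr fuel x low (mid - 1)
      else pvPresentLoop arr fuel x (mid + 1) high
    else false

def pvChecks (n_points max_inds ind : Int) : List Int :=
  (if ind ≥ n_points then [ind - n_points] else []) ++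
  (if ind < max_inds - n_points then [ind + n_points] else []) ++
  (if PySem.Int.mod ind n_points > 0 then [ind - 1] else []) ++
  (if PySem.Int.mod (ind + 1) n_points ≠ 0 then [ind + 1] else [])

def bc_check_neighbours_alt (this_inds : List Int) (n_points : Int) : List Int :=
  let n : Int := this_inds.length
  let max_inds := n_points ^ 2
  this_inds.filter (fun ind =>
    (pvChecks n_points max_inds ind).any (fun x => !pvPresentLoop this_inds (this_inds.length + 1) x 0 (n - 1)))

-- ===== PRECONDITION & SPEC =====
-- Pre_ excludes exactly the inputs on which A raises: with n_points = 0 and a nonempty list, A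
-- always reaches `ind % 0` (ZeroDivisionError); it excludes no input on which A returns.
def Pre_bc_check_neighbours (this_inds : List Int) (n_points : Int) : Prop :=
  this_inds = [] ∨ n_points ≠ 0
instance (this_inds : List Int) (n_points : Int) : Decidable (Pre_bc_check_neighbours this_inds n_points) := by unfold Pre_bc_check_neighbours; infer_instance

def pvWitness_bc_check_neighbours : List Int × Int := ([0, 1, 100, 205], 100)

def Spec_bc_check_neighbours (this_inds : List Int) (n_points : Int) (out : List Int) : Prop := out = bc_check_neighbours_alt this_inds n_points
instance (this_inds : List Int) (n_points : Int) (out : List Int) : Decidable (Spec_bc_check_neighbours this_inds n_points out) := by unfold Spec_bc_check_neighbours; infer_instance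

-- ===== CLAIM (what is proved, stated in full; the proofs are below) =====
def Claim_equal_bc_check_neighbours : Prop := ∀ (this_inds : List Int) (n_points : Int), Dom_bc_check_neighbours this_inds n_points → Pre_bc_check_neighbours this_inds n_points → Spec_bc_check_neighbours this_inds n_points (bc_check_neighbours this_inds n_points)

-- ===== LEMMAS AND PROOFS =====

-- the two searches agree: A's returns -1 exactly where B's loop returns false
theorem pv_search_agree (arr : List Int) (x : Int) :
    ∀ (fuel : Nat) (low high : Int), 0 ≤ low →
      (pvBinSearch arr fuel low high x = -1 ↔ pvPresentLoop arr fuel x low high = false) := by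
  intro fuel
  induction fuel with
  | zero => intro low high _; simp [pvBinSearch, pvPresentLoop]
  | succ fuel ih =>
    intro low high hlow
    rw [pvBinSearch, pvPresentLoop]
    by_cases hge : high ≥ low
    · have hmid := PySem.Int.floordiv_two_mid_bounds (lo := low) (hi := high) (by omega)
      rw [Int.add_comm low high] at hmid
      rw [if_pos hge, if_pos hge]
      by_cases hveq : (PySem.List.pyGet? arr (PySem.Int.floordiv (high + low) 2)).getD 0 = x
      · rw [if_pos hveq, if_pos hveq]
        constructor
        · intro hmideq; omega
        · intro hf; simp at hf
      · rw [if_neg hveq, if_neg hveq]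
        by_cases hgt : (PySem.List.pyGet? arr (PySem.Int.floordiv (high + low) 2)).getD 0 > x
        · rw [if_pos hgt, if_pos hgt]
          exact ih low _ hlow
        · rw [if_neg hgt, if_neg hgt]
          exact ih _ high (by omega)
    · rw [if_neg hge, if_neg hge]
      simp

theorem pvBinSearch_eq_neg_one_iff (arr : List Int) (fuel : Nat) (x high : Int) :
    pvBinSearch arr fuel 0 high x = -1 ↔ pvPresentLoop arr fuel x 0 high = false :=
  pv_search_agree arr x fuel 0 high le_rfl

-- one stage of A's continue chain
theorem pv_step_one {c m : Prop} [Decidable c] [Decidable m] {app next : List Int} :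
    (if c then (if m then app else next) else next) = if c ∧ m then app else next := by
  split_ifs <;> simp_all

-- merging two stages that agree on the appended value
theorem pv_ite_or {p q : Prop} [Decidable p] [Decidable q] {a b : List Int} :
    (if p then a else if q then a else b) = if p ∨ q then a else b := by
  split_ifs <;> simp_all

-- B's candidate list tested with any() is the disjunction of the four guarded tests
theorem pv_checks_any_iff (n_points max_inds ind : Int) (f : Int → Bool) :
    ((pvChecks n_points max_inds ind).any f = true) ↔
      ((ind ≥ n_points ∧ f (ind - n_points) = true) ∨
       ((ind < max_inds - n_points ∧ f (ind + n_points) = true) ∨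
        ((PySem.Int.mod ind n_points > 0 ∧ f (ind - 1) = true) ∨
         (PySem.Int.mod (ind + 1) n_points ≠ 0 ∧ f (ind + 1) = true)))) := by
  unfold pvChecks
  split_ifs <;> simp <;> tauto

-- A's continue chain for one index equals "some applicable neighbour is absent"
theorem pv_step_eq (this_inds : List Int) (n_points max_inds ind : Int) (acc : List Int) :
    (let n_inds : Int := this_inds.length
     let after_left :=
       if PySem.Int.mod (ind + 1) n_points ≠ 0 then
         if pvBinSearch this_inds (this_inds.length + 1) 0 (n_inds - 1) (ind + 1) = -1 then acc ++ [ind] else acc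
       else acc
     let after_bottom :=
       if PySem.Int.mod ind n_points > 0 then
         if pvBinSearch this_inds (this_inds.length + 1) 0 (n_inds - 1) (ind - 1) = -1 then acc ++ [ind] else after_left
       else after_left
     let after_up :=
       if ind < max_inds - n_points then
         if pvBinSearch this_inds (this_inds.length + 1) 0 (n_inds - 1) (ind + n_points) = -1 then acc ++ [ind] else after_bottom
       else after_bottom
     if ind ≥ n_points then
       if pvBinSearch this_inds (this_inds.length + 1) 0 (n_inds - 1) (ind - n_points) = -1 then acc ++ [ind] else after_up
     else after_up)
    = if (pvChecks n_points max_inds ind).any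
           (fun x => !pvPresentLoop this_inds (this_inds.length + 1) x 0 ((this_inds.length : Int) - 1)) then
        acc ++ [ind]
      else acc := by
  simp only [pv_step_one]
  simp only [pv_ite_or]
  refine if_congr ?_ rfl rfl
  rw [pv_checks_any_iff]
  simp only [Bool.not_eq_true', pvBinSearch_eq_neg_one_iff]

theorem pv_main (this_inds : List Int) (n_points : Int) :
    bc_check_neighbours this_inds n_points = bc_check_neighbours_alt this_inds n_points := by
  unfold bc_check_neighbours bc_check_neighbours_alt
  have hstep := fun acc ind => pv_step_eq this_inds n_points (n_points ^ 2) ind acc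
  simp only at hstep ⊢
  rw [PySem.List.foldl_congr_mem this_inds _
        (fun (acc : List Int) ind => if (pvChecks n_points (n_points ^ 2) ind).any
          (fun x => !pvPresentLoop this_inds (this_inds.length + 1) x 0 ((this_inds.length : Int) - 1)) then acc ++ [id ind] else acc)
        [] (fun acc ind _ => hstep acc ind)]
  rw [PySem.List.foldl_append_if]
  simp [List.map_id]

-- ===== VERDICT (by name: the statement is the Claim_ definition above) =====
theorem bc_check_neighbours_spec : Claim_equal_bc_check_neighbours := by
  intro this_inds n_points _ _
  unfold Spec_bc_check_neighbours
  exact pv_main this_inds n_points
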